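-- pv_equiv track=rewrite | github.com/ekolivero/foo-bar | en_route_salute/solution.py | solution
-- ===== SOURCE A (Python) =====
-- def solution(s):
--     # Get the position of all emplyee walking to the right
--     l_right = [idx for idx, item in enumerate(s.lower()) if '>' in item]
--     # Get the position of all emplyee walking to the left
--     l_left = [idx for idx, item in enumerate(s.lower()) if '<' in item]
--
--     # Number of salutes done.
--     salutes = 0
--
--     for right in l_right:
--         for left in l_left:
--             if (left > right):
--                 # When two employee will cross I increment the salutes.
--                 salutes = salutes + 2
--
--     return salutes
-- ===== SOURCE B (Python) =====
-- def solution(s):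
--     rights = 0
--     salutes = 0
--     for c in s:
--         if c == '>':
--             rights += 1
--         elif c == '<':
--             salutes += 2 * rights
--     return salutes
-- ===== Notes on version B (the rewrite author's own statement) =====
-- stated objective: faster
-- what changed: Replaced the two index-list comprehensions plus the quadratic nested loop over all (right,left) index pairs by a single left-to-right pass that counts '>' seen so far and adds 2*count at each '<'.
import Mathlib
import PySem

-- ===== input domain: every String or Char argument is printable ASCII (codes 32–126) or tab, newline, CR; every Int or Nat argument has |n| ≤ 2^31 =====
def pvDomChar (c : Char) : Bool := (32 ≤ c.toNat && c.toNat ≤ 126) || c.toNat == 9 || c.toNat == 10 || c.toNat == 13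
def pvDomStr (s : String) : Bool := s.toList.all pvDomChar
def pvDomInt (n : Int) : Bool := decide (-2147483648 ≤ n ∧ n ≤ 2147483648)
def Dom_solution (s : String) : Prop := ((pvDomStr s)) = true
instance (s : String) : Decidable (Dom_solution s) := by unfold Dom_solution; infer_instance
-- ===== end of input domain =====

-- B replaces A's quadratic nested loop over all (right,left) index pairs by a single
-- left-to-right pass counting '>' seen so far (objective: faster).

-- ===== PORT A =====
-- literal transliteration of A: build the index lists of '>' and '<' over s.lower()
-- ('>' in item is equality for the one-char string item), then the nested loop.
def solution (s : String) : Int :=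
  let lowered := PySem.Chars.lower s.toList
  let l_right := ((PySem.List.enumerate lowered).filter (fun p => p.2 == '>')).map (fun p => p.1)
  let l_left  := ((PySem.List.enumerate lowered).filter (fun p => p.2 == '<')).map (fun p => p.1)
  l_right.foldl (fun salutes right =>
    l_left.foldl (fun salutes left => if right < left then salutes + 2 else salutes) salutes) 0

-- ===== PORT B =====
-- literal transliteration of Source B: one fold carrying (rights, salutes)
def solution_alt (s : String) : Int :=
  (s.toList.foldl
    (fun (st : Int × Int) c =>
      if c == '>' then (st.1 + 1, st.2)
      else if c == '<' then (st.1, st.2 + 2 * st.1)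
      else st)
    (0, 0)).2

-- ===== PRECONDITION & SPEC =====
def Spec_solution (s : String) (out : Int) : Prop := out = solution_alt s
instance (s : String) (out : Int) : Decidable (Spec_solution s out) := by unfold Spec_solution; infer_instance

-- ===== CLAIM (what is proved, stated in full; the proofs are below) =====
def Claim_equal_solution : Prop := ∀ (s : String), Dom_solution s → Spec_solution s (solution s)

-- ===== LEMMAS AND PROOFS =====

-- the index list of occurrences of d in cs, counting positions from n (A's comprehensions)
def pvIdx (d : Char) (cs : List Char) (n : Int) : List Int :=
  ((PySem.List.enumerate cs n).filter (fun p => p.2 == d)).map (fun p => p.1)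

-- twice the number of ('>' before '<') pairs: the common value of both programs
def pvX : List Char → Int
  | [] => 0
  | c :: cs => (if c == '>' then 2 * ((cs.countP (fun x => x == '<') : Nat) : Int) else 0) + pvX cs

lemma pvIdx_nil (d : Char) (n : Int) : pvIdx d [] n = [] := rfl

lemma pvIdx_cons (d c : Char) (cs : List Char) (n : Int) :
    pvIdx d (c :: cs) n = (if c == d then [n] else []) ++ pvIdx d cs (n + 1) := by
  simp only [pvIdx, PySem.List.enumerate_cons, List.filter_cons]
  by_cases h : c == d <;> simp [h]

lemma pvIdx_lb (d : Char) : ∀ (cs : List Char) (n r : Int), r ∈ pvIdx d cs n → n ≤ r := by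
  intro cs
  induction cs with
  | nil => intro n r h; simp [pvIdx_nil] at h
  | cons c cs ih =>
    intro n r h
    rw [pvIdx_cons] at h
    rcases List.mem_append.mp h with h1 | h2
    · by_cases hc : c == d
      · simp [hc] at h1; omega
      · simp [hc] at h1
    · have := ih (n + 1) r h2; omega

lemma pvIdx_length (d : Char) : ∀ (cs : List Char) (n : Int),
    (pvIdx d cs n).length = cs.countP (fun x => x == d) := by
  intro cs
  induction cs with
  | nil => intro n; simp [pvIdx_nil]
  | cons c cs ih =>
    intro n
    rw [pvIdx_cons, List.length_append, List.countP_cons, ih]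
    by_cases hc : c == d
    · simp [hc]; omega
    · simp [hc]

lemma pv_inner_foldl (L : List Int) (r acc : Int) :
    L.foldl (fun a l => if r < l then a + 2 else a) acc
      = acc + 2 * ((L.countP (fun l => decide (r < l)) : Nat) : Int) := by
  induction L generalizing acc with
  | nil => simp
  | cons l L ih =>
    rw [List.foldl_cons, ih, List.countP_cons]
    by_cases h : r < l
    · simp [h]; ring
    · simp [h]

lemma pv_sum_main : ∀ (cs : List Char) (n : Int),
    ((pvIdx '>' cs n).map
      (fun r => 2 * (((pvIdx '<' cs n).countP (fun l => decide (r < l)) : Nat) : Int))).sum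
      = pvX cs := by
  intro cs
  induction cs with
  | nil => intro n; simp [pvIdx_nil, pvX]
  | cons c cs ih =>
    intro n
    rw [pvIdx_cons '>', pvIdx_cons '<', List.map_append, List.sum_append]
    have htail :
        ((pvIdx '>' cs (n + 1)).map
          (fun r => 2 * ((((if c == '<' then [n] else []) ++ pvIdx '<' cs (n + 1)).countP
              (fun l => decide (r < l)) : Nat) : Int))).sum
          = ((pvIdx '>' cs (n + 1)).map
          (fun r => 2 * (((pvIdx '<' cs (n + 1)).countP (fun l => decide (r < l)) : Nat) : Int))).sum := by
      apply congrArg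
      apply List.map_congr_left
      intro r hr
      have hrb : n + 1 ≤ r := pvIdx_lb '>' cs (n + 1) r hr
      have hz : (if c == '<' then [n] else ([] : List Int)).countP (fun l => decide (r < l)) = 0 := by
        by_cases hc : c == '<' <;> simp [hc]; omega
      rw [List.countP_append, hz]
      simp
    rw [htail, ih]
    by_cases hg : c == '>'
    · have hl : (c == '<') = false := by
        simp only [beq_iff_eq] at hg; subst hg; decide
      have hcnt : (pvIdx '<' cs (n + 1)).countP (fun l => decide (n < l))
          = (pvIdx '<' cs (n + 1)).length :=
        List.countP_eq_length.mpr (fun l hmem => by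
          have := pvIdx_lb '<' cs (n + 1) l hmem
          simp; omega)
      simp [hg, hl, hcnt, pvIdx_length, pvX]
    · simp [hg, pvX]

lemma pv_lowerChar_eq_iff (c d : Char) (hd : d.toNat < 65) :
    PySem.Chars.lowerChar c = d ↔ c = d := by
  unfold PySem.Chars.lowerChar
  by_cases h : PySem.Chars.isupper c = true
  · rw [if_pos h]
    unfold PySem.Chars.isupper at h
    simp only [Bool.and_eq_true, decide_eq_true_eq] at h
    obtain ⟨h1, h2⟩ := h
    have hA : 65 ≤ c.toNat ∧ c.toNat ≤ 90 := by
      rw [Char.le_def] at h1 h2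
      rw [UInt32.le_iff_toNat_le] at h1 h2
      exact ⟨h1, h2⟩
    constructor
    · intro he
      exfalso
      have hv : (c.toNat + 32).isValidChar := Or.inl (by omega)
      have ht := congrArg Char.toNat he
      rw [Char.toNat_ofNat, if_pos hv] at ht
      omega
    · intro he
      subst he
      exfalso
      omega
  · rw [if_neg h]
  
lemma pv_map_count (cs : List Char) :
    (cs.map PySem.Chars.lowerChar).countP (fun x => x == '<')
      = cs.countP (fun x => x == '<') := by
  induction cs with
  | nil => rfl
  | cons c cs ih =>
    have hiff : PySem.Chars.lowerChar c = '<' ↔ c = '<' :=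
      pv_lowerChar_eq_iff c '<' (by decide)
    simp only [List.map_cons, List.countP_cons, ih, beq_iff_eq]
    by_cases hc : c = '<'
    · subst hc
      simp [show PySem.Chars.lowerChar '<' = '<' from by decide]
    · have hn : PySem.Chars.lowerChar c ≠ '<' := fun h => hc (hiff.mp h)
      simp [hc, hn]

lemma pv_map_X (cs : List Char) : pvX (cs.map PySem.Chars.lowerChar) = pvX cs := by
  induction cs with
  | nil => rfl
  | cons c cs ih =>
    have hiff : PySem.Chars.lowerChar c = '>' ↔ c = '>' :=
      pv_lowerChar_eq_iff c '>' (by decide)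
    have hc' : (PySem.Chars.lowerChar c == '>') = (c == '>') := by
      by_cases hc : c = '>'
      · subst hc; decide
      · have hn : PySem.Chars.lowerChar c ≠ '>' := fun h => hc (hiff.mp h)
        simp [hc, hn]
    simp only [List.map_cons, pvX, ih, pv_map_count, hc']

lemma pv_B_loop : ∀ (cs : List Char) (a b : Int),
    (cs.foldl
      (fun (st : Int × Int) c =>
        if c == '>' then (st.1 + 1, st.2)
        else if c == '<' then (st.1, st.2 + 2 * st.1)
        else st)
      (a, b)).2
    = b + 2 * a * ((cs.countP (fun x => x == '<') : Nat) : Int) + pvX cs := by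
  intro cs
  induction cs with
  | nil => intro a b; simp [pvX]
  | cons c cs ih =>
    intro a b
    rw [List.foldl_cons]
    by_cases h1 : c == '>'
    · have h2 : (c == '<') = false := by
        simp only [beq_iff_eq] at h1; subst h1; decide
      rw [if_pos h1]
      rw [ih, List.countP_cons]
      simp [pvX, h1, h2]; ring
    · by_cases h2 : c == '<'
      · rw [if_neg (by simp [h1]), if_pos h2]
        rw [ih, List.countP_cons]
        simp [pvX, h1, h2]; ring
      · rw [if_neg (by simp [h1]), if_neg (by simp [h2])]
        rw [ih, List.countP_cons]
        simp [pvX, h1, h2]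

lemma pv_main (s : String) : solution s = solution_alt s := by
  unfold solution solution_alt
  simp only [pv_inner_foldl]
  rw [PySem.List.foldl_add]
  have hA : ((pvIdx '>' (PySem.Chars.lower s.toList) 0).map
      (fun r => 2 * (((pvIdx '<' (PySem.Chars.lower s.toList) 0).countP
        (fun l => decide (r < l)) : Nat) : Int))).sum = pvX (PySem.Chars.lower s.toList) :=
    pv_sum_main _ 0
  simp only [pvIdx] at hA
  rw [hA, pv_B_loop s.toList 0 0]
  rw [show PySem.Chars.lower s.toList = s.toList.map PySem.Chars.lowerChar from rfl, pv_map_X]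
  ring

-- ===== VERDICT (by name: the statement is the Claim_ definition above) =====
theorem solution_spec : Claim_equal_solution := by
  intro s _
  unfold Spec_solution
  exact pv_main s
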